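-- pv_equiv track=rewrite | github.com/BonucciAndrea/DurreHeesch | Dreducing_graphs_final.py | FourComp
-- ===== SOURCE A (Python) =====
-- def FourComp(n, f):
--     N = []
--     CurrN = []
--     L = list(range(4))
--     L.remove(f)
--     if n == 1 and 0 in L:
--         L.remove(0)
--     if n == 0:
--         return [[]]
--     for x in range(len(L)):
--         if x < len(L) - 1:
--             CurrN.append(L[x])
--             CurrN1 = list(CurrN)
--             y = FourComp(n-1, L[x])
--             for z in y:
--                 for q in z:
--                     CurrN1.append(q)
--                 N.append(CurrN1)
--                 CurrN1 = list(CurrN)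
--             del CurrN[-1]
--         else:
--             CurrN.append(L[x])
--             CurrN1 = list(CurrN)
--             y = FourComp(n - 1, L[x])
--             for z in y:
--                 for q in z:
--                     CurrN1.append(q)
--                 N.append(CurrN1)
--                 CurrN1 = list(CurrN)
--     return N
-- ===== SOURCE B (Python) =====
-- def FourComp(n, f):
--     L = list(range(4))
--     L.remove(f)  # validates f exactly as A does (ValueError if f not in 0..3)
--     if n == 0:
--         return [[]]
--     level = [([], f)]
--     for step in range(n):
--         last = step == n - 1
--         level = [(seq + [s], s)
--                  for seq, prev in level
--                  for s in range(4)
--                  if s != prev and not (last and s == 0)]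
--     return [seq for seq, _ in level]
-- ===== Notes on version B (the rewrite author's own statement) =====
-- stated objective: alternative
-- what changed: Replaced A's suffix recursion (recursing on the remaining length for each allowed next symbol and stitching prefixes with inner append loops) by an iterative BFS level builder that extends all prefixes one position per round, applying the no-trailing-0 rule only in the last round.
import Mathlib
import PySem

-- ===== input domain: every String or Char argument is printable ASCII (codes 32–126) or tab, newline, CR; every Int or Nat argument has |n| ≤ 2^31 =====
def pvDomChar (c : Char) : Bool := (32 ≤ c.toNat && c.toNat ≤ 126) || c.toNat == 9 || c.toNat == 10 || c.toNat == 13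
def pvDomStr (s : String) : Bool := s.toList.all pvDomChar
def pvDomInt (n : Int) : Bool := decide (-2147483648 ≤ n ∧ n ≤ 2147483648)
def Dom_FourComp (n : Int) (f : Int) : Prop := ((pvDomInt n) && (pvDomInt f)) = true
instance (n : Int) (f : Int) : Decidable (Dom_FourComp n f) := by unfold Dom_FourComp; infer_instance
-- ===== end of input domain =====

-- B replaces A's recursion by an iterative BFS prefix builder (different decomposition, same cost).


-- ===== PORT A =====
-- A's recursion on n, transcribed with the Int n replaced by a Nat fuel (A diverges for n < 0,
-- which Pre_ excludes; L.remove(f), which raises for f ∉ {0,1,2,3}, is remove? — Pre_ excludes none).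
def FourCompA : Nat → Int → List (List Int)
  | n, f =>
    let L0 := (PySem.List.remove? ([0, 1, 2, 3] : List Int) f).getD []
    let L := if n = 1 ∧ (0 : Int) ∈ L0 then (PySem.List.remove? L0 0).getD [] else L0
    match n with
    | 0 => [[]]
    | Nat.succ m =>
      -- both branches of A's x-loop do the same thing: append L[x], recurse, prefix each result
      (List.range L.length).foldl
        (fun N x =>
          let c := L.getD x 0   -- L[x], always in range
          N ++ (FourCompA m c).map (fun z => c :: z)) []

def FourComp (n : Int) (f : Int) : List (List Int) := FourCompA n.toNat f

-- ===== PORT B =====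
-- one BFS round: extend every (seq, prev) by each s ≠ prev, excluding 0 in the last round
def FourCompB_step (last : Bool) (level : List (List Int × Int)) : List (List Int × Int) :=
  level.flatMap (fun p =>
    ([0, 1, 2, 3] : List Int).filterMap (fun s =>
      if s ≠ p.2 ∧ ¬(last = true ∧ s = 0) then some (p.1 ++ [s], s) else none))

def FourComp_alt (n : Int) (f : Int) : List (List Int) :=
  if f ∈ ([0, 1, 2, 3] : List Int) then   -- L.remove(f): raises ValueError otherwise (outside Pre_)
    if n = 0 then [[]]
    else
      ((List.range n.toNat).foldl
        (fun level step => FourCompB_step (step == n.toNat - 1) level)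
        [([], f)]).map Prod.fst
  else []

-- ===== PRECONDITION & SPEC =====
-- Pre_ is exactly where Python A returns: f must be in range(4) (else L.remove(f) raises
-- ValueError) and n ≥ 0 (else the recursion never reaches its base case and A diverges).
def Pre_FourComp (n : Int) (f : Int) : Prop := 0 ≤ n ∧ (f = 0 ∨ f = 1 ∨ f = 2 ∨ f = 3)
instance (n : Int) (f : Int) : Decidable (Pre_FourComp n f) := by unfold Pre_FourComp; infer_instance
def pvWitness_FourComp : Int × Int := (3, 1)

def Spec_FourComp (n : Int) (f : Int) (out : List (List Int)) : Prop := out = FourComp_alt n f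
instance (n : Int) (f : Int) (out : List (List Int)) : Decidable (Spec_FourComp n f out) := by unfold Spec_FourComp; infer_instance

-- ===== CLAIM (what is proved, stated in full; the proofs are below) =====
def Claim_equal_FourComp : Prop := ∀ (n : Int) (f : Int), Dom_FourComp n f → Pre_FourComp n f → Spec_FourComp n f (FourComp n f)

-- ===== LEMMAS AND PROOFS =====

-- the effect of B's loop, indexed by the list of "last round?" flags it sees
def Uexp : List Bool → List Int → Int → List (List Int × Int)
  | [], pre, prev => [(pre, prev)]
  | flag :: fs, pre, prev =>
    (([0, 1, 2, 3] : List Int).filter (fun s => decide (s ≠ prev ∧ ¬(flag = true ∧ s = 0)))).flatMap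
      (fun s => Uexp fs (pre ++ [s]) s)

lemma filterMap_if {α β : Type} (l : List α) (c : α → Prop) [DecidablePred c] (g : α → β) :
    l.filterMap (fun s => if c s then some (g s) else none)
      = (l.filter (fun s => decide (c s))).map g := by
  induction l with
  | nil => rfl
  | cons a t ih =>
    simp only [List.filterMap_cons, List.filter_cons]
    split_ifs with h <;> simp_all

lemma step_eq (last : Bool) (level : List (List Int × Int)) :
    FourCompB_step last level =
      level.flatMap (fun p =>
        (([0, 1, 2, 3] : List Int).filter (fun s => decide (s ≠ p.2 ∧ ¬(last = true ∧ s = 0)))).map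
          (fun s => (p.1 ++ [s], s))) := by
  unfold FourCompB_step
  refine List.flatMap_congr ?_
  intro p _
  exact filterMap_if _ _ _

lemma foldl_step_eq (fs : List Bool) (level : List (List Int × Int)) :
    fs.foldl (fun lv flag => FourCompB_step flag lv) level
      = level.flatMap (fun p => Uexp fs p.1 p.2) := by
  induction fs generalizing level with
  | nil => simp [Uexp]
  | cons flag rest ih =>
    simp only [List.foldl_cons]
    rw [ih, step_eq, List.flatMap_assoc]
    refine List.flatMap_congr ?_
    intro p _
    rw [List.flatMap_map]
    rfl

lemma flags_eq (m : Nat) :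
    (List.range (m + 1)).map (fun j => j == m) = List.replicate m false ++ [true] := by
  rw [List.range_succ, List.map_append]
  have h1 : (List.range m).map (fun j => j == m) = List.replicate m false := by
    simp only [List.eq_replicate_iff, List.length_map, List.length_range, true_and]
    intro b hb
    obtain ⟨j, hj, rfl⟩ := List.mem_map.mp hb
    simp [Nat.ne_of_lt (List.mem_range.mp hj)]
  rw [h1]
  simp

-- A's loop body as a flatMap over L
lemma A_loop_eq (m : Nat) (L : List Int) :
    (List.range L.length).foldl
        (fun N x =>
          let c := L.getD x 0
          N ++ (FourCompA m c).map (fun z => c :: z)) []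
      = L.flatMap (fun c => (FourCompA m c).map (fun z => c :: z)) := by
  rw [PySem.List.foldl_append_eq_flatMap]
  simp only [List.nil_append]
  induction L with
  | nil => rfl
  | cons a l ih =>
    rw [List.length_cons, List.range_succ_eq_map, List.flatMap_cons, List.flatMap_map]
    simp only [List.getD_cons_zero, List.getD_cons_succ]
    rw [ih, List.flatMap_cons]

-- unfold one level of A's recursion through A_loop_eq
lemma FourCompA_succ (m : Nat) (f : Int) :
    FourCompA (m + 1) f =
      (let L0 := (PySem.List.remove? ([0, 1, 2, 3] : List Int) f).getD []
       let L := if m + 1 = 1 ∧ (0 : Int) ∈ L0 then (PySem.List.remove? L0 0).getD [] else L0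
       L.flatMap (fun c => (FourCompA m c).map (fun z => c :: z))) := by
  conv_lhs => rw [FourCompA]
  exact A_loop_eq m _

-- the filtered symbol list equals A's L, for f ∈ {0,1,2,3}
lemma L_eq_filter (f : Int) (hf : f = 0 ∨ f = 1 ∨ f = 2 ∨ f = 3) :
    (PySem.List.remove? ([0, 1, 2, 3] : List Int) f).getD []
      = ([0, 1, 2, 3] : List Int).filter (fun s => decide (s ≠ f)) := by
  rcases hf with h | h | h | h <;> subst h <;> decide

-- main induction: Uexp over (replicate m false ++ [true]) is A (m+1) prefixed by pre
lemma U_main (m : Nat) : ∀ (f : Int), (f = 0 ∨ f = 1 ∨ f = 2 ∨ f = 3) → ∀ pre : List Int,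
    (Uexp (List.replicate m false ++ [true]) pre f).map Prod.fst
      = (FourCompA (m + 1) f).map (fun z => pre ++ z) := by
  induction m with
  | zero =>
    intro f hf pre
    rcases hf with h | h | h | h <;> subst h <;>
      simp [Uexp, FourCompA, PySem.List.remove?, List.idxOf?, List.findIdx?, List.findIdx?.go, List.range_succ]
  | succ k ih =>
    intro f hf pre
    rw [FourCompA_succ]
    simp only [List.replicate_succ, List.cons_append]
    rw [Uexp, List.map_flatMap]
    have hcond : (fun s : Int => decide (s ≠ f ∧ ¬(false = true ∧ s = 0)))
        = (fun s : Int => decide (s ≠ f)) := by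
      funext s; simp
    rw [hcond]
    rw [if_neg (by rintro ⟨h1, -⟩; omega :
          ¬(k + 1 + 1 = 1 ∧ (0:Int) ∈ (PySem.List.remove? ([0,1,2,3] : List Int) f).getD []))]
    rw [L_eq_filter f hf, List.map_flatMap]
    refine List.flatMap_congr ?_
    intro s hs
    have hs4 : s = 0 ∨ s = 1 ∨ s = 2 ∨ s = 3 := by
      have := (List.mem_filter.mp hs).1
      simpa using this
    rw [ih s hs4 (pre ++ [s])]
    rw [List.map_map]
    refine List.map_congr_left ?_
    intro z _
    simp

-- ===== VERDICT (by name: the statement is the Claim_ definition above) =====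
theorem FourComp_spec : Claim_equal_FourComp := by
  intro n f _ hpre
  obtain ⟨hn, hf⟩ := hpre
  unfold Spec_FourComp FourComp FourComp_alt
  have hfmem : f ∈ ([0, 1, 2, 3] : List Int) := by rcases hf with h | h | h | h <;> subst h <;> decide
  rw [if_pos hfmem]
  by_cases h0 : n = 0
  · subst h0
    simp [FourCompA]
  · rw [if_neg h0]
    obtain ⟨m, hm⟩ : ∃ m, n.toNat = m + 1 := by
      refine ⟨n.toNat - 1, ?_⟩
      omega
    rw [hm]
    simp only [Nat.add_sub_cancel]
    have hconv : (List.range (m + 1)).foldl (fun lv j => FourCompB_step (j == m) lv) [(([] : List Int), f)]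
        = ((List.range (m + 1)).map (fun j => j == m)).foldl (fun lv flag => FourCompB_step flag lv) [(([] : List Int), f)] := by
      rw [List.foldl_map]
    rw [hconv, flags_eq, foldl_step_eq]
    simp only [List.flatMap_cons, List.flatMap_nil, List.append_nil]
    rw [U_main m f hf []]
    simp
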